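-- pv_equiv track=rewrite | github.com/SallyPeng00/61a | lab/lab05/lab05_checkoff.py | partitions_options
-- ===== SOURCE A (Python) =====
-- def partitions_options(total, biggest_num):
-- 	if total == 0:
-- 		return [[]]
-- 	elif total < 0:
-- 		return []
-- 	if biggest_num == 0:
-- 		return []
-- 	else:
-- 		with_biggest = partitions_options(total-biggest_num, min(biggest_num, total-biggest_num))
-- 		without_biggest = partitions_options(total, biggest_num-1)
-- 		with_biggest = [[biggest_num] + elem for elem in with_biggest]
-- 		return with_biggest + without_biggest
-- ===== SOURCE B (Python) =====
-- def partitions_options(total, biggest_num):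
--     if total < 0:
--         return []
--     result = []
--     stack = [([], total, biggest_num)]
--     while stack:
--         prefix, rem, cap = stack.pop()
--         if rem == 0:
--             result.append(prefix)
--             continue
--         # push smallest largest-part first, so the pop order is largest-part first
--         for k in range(1, min(cap, rem) + 1):
--             stack.append((prefix + [k], rem - k, k))
--     return result
-- ===== Notes on version B (the rewrite author's own statement) =====
-- stated objective: alternative
-- what changed: Replaces A's two-way include/exclude recursion on (total, biggest_num) with an iterative explicit-stack depth-first loop over the largest part k = min(cap, remaining)..1, which also removes Python's recursion-depth limit.
import Mathlib
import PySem

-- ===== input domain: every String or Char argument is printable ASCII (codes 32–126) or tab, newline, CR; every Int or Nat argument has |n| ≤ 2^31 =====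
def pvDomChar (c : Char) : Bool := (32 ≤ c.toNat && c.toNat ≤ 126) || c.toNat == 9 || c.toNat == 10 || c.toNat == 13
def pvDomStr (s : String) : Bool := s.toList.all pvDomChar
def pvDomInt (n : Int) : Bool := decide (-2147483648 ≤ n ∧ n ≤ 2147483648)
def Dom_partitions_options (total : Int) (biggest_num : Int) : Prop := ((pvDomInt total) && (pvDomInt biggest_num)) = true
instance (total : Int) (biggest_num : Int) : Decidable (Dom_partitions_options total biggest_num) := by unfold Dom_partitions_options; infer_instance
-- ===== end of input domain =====

-- B replaces A's two-way include/exclude recursion on (total, biggest_num) by an explicit-stack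
-- depth-first loop over the largest part (objective: alternative decomposition, same cost).

-- ===== PORT A =====
-- A's recursion does not terminate for total > 0 ∧ biggest_num < 0 (Python raises RecursionError
-- there); the fuel below only makes the transliteration total — it is provably sufficient on Pre_.
def partsA (fuel : Nat) (total biggest_num : Int) : List (List Int) :=
  match fuel with
  | 0 => []
  | f + 1 =>
    if total = 0 then [[]]
    else if total < 0 then []
    else if biggest_num = 0 then []
    else
      ((partsA f (total - biggest_num) (min biggest_num (total - biggest_num))).map
        (fun elem => biggest_num :: elem)) ++ partsA f total (biggest_num - 1)

def partitions_options (total : Int) (biggest_num : Int) : List (List Int) :=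
  partsA (total.toNat + biggest_num.toNat + 1) total biggest_num

-- ===== PORT B =====
-- the while loop of B: stack of (prefix, remaining, cap), Python's stack top = list head here
-- (Python pushes k = 1 .. min(cap, rem) by append and pops from the end, hence the .reverse).
-- The fuel only makes the loop total; 2^(total+1) provably bounds the iteration count (see below).
def altLoop (fuel : Nat) (stack : List (List Int × Int × Int)) (result : List (List Int)) : List (List Int) :=
  match fuel with
  | 0 => result
  | f + 1 =>
    match stack with
    | [] => result
    | (pre, rem, cap) :: rest =>
      if rem = 0 then altLoop f rest (result ++ [pre])
      else
        altLoop f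
          (((PySem.List.pyRange 1 (min cap rem + 1) 1).map
              (fun k => (pre ++ [k], rem - k, k))).reverse ++ rest)
          result

def partitions_options_alt (total : Int) (biggest_num : Int) : List (List Int) :=
  if total < 0 then []
  else altLoop (2 ^ (total.toNat + 1)) [([], total, biggest_num)] []

-- ===== PRECONDITION & SPEC =====
-- Pre_ excludes exactly total > 0 ∧ biggest_num < 0, where Python A recurses forever
-- (RecursionError); A returns normally everywhere else.
def Pre_partitions_options (total : Int) (biggest_num : Int) : Prop :=
  0 ≤ biggest_num ∨ total ≤ 0
instance (total : Int) (biggest_num : Int) : Decidable (Pre_partitions_options total biggest_num) := by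
  unfold Pre_partitions_options; infer_instance

def pvWitness_partitions_options : Int × Int := (6, 4)

def Spec_partitions_options (total : Int) (biggest_num : Int) (out : List (List Int)) : Prop :=
  out = partitions_options_alt total biggest_num
instance (total : Int) (biggest_num : Int) (out : List (List Int)) : Decidable (Spec_partitions_options total biggest_num out) := by
  unfold Spec_partitions_options; infer_instance

-- ===== CLAIM (what is proved, stated in full; the proofs are below) =====
def Claim_equal_partitions_options : Prop := ∀ (total : Int) (biggest_num : Int), Dom_partitions_options total biggest_num → Pre_partitions_options total biggest_num → Spec_partitions_options total biggest_num (partitions_options total biggest_num)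

-- ===== LEMMAS AND PROOFS =====

-- termination helpers for the stack loop (cited by decreasing_by): geometric sum of powers of 2
theorem geomAux (rN : Nat) : ∀ mN, mN ≤ rN →
    ((List.range mN).map (fun j => 2 ^ (rN - 1 - j))).sum + 2 ^ (rN - mN) = 2 ^ rN := by
  intro mN
  induction mN with
  | zero => simp
  | succ m ih =>
    intro h
    rw [List.range_succ, List.map_append, List.sum_append]
    simp only [List.map_cons, List.map_nil, List.sum_cons, List.sum_nil]
    have h2 : rN - 1 - m = rN - (m + 1) := by omega
    have hp : 2 ^ (rN - m) = 2 ^ (rN - (m + 1)) * 2 := by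
      rw [show rN - m = (rN - (m + 1)) + 1 by omega, pow_succ]
    have := ih (by omega)
    rw [h2]
    omega

-- the children pushed for a popped entry with remainder `rem` weigh strictly less than 2 ^ rem.toNat
theorem pushSum_lt (rem m : Int) (_hrem : rem ≠ 0) :
    ((PySem.List.pyRange 1 (min m rem + 1) 1).map (fun k => 2 ^ (rem - k).toNat)).sum
      < 2 ^ rem.toNat := by
  by_cases h : min m rem + 1 ≤ 1
  · rw [PySem.List.pyRange_one_eq_nil h]
    simp
  · have hrem' : 0 < rem := by omega
    rw [PySem.List.pyRange_one, List.map_map]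
    have hsimp : (min m rem + 1 - 1).toNat = (min m rem).toNat := by omega
    have hcg : ∀ j ∈ List.range ((min m rem).toNat),
        ((fun k => 2 ^ (rem - k).toNat) ∘ (fun j : Nat => (1 : Int) + j)) j
          = 2 ^ (rem.toNat - 1 - j) := by
      intro j hj
      have hj' := List.mem_range.mp hj
      simp only [Function.comp]
      congr 1
      omega
    rw [hsimp, List.map_congr_left hcg]
    have hle : (min m rem).toNat ≤ rem.toNat := by omega
    have hgeo := geomAux rem.toNat ((min m rem).toNat) hle
    have hpos : 1 ≤ 2 ^ (rem.toNat - (min m rem).toNat) := Nat.one_le_two_pow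
    omega


-- termination of gPart, as a named lemma so the recursion carries only a small proof term
theorem gPart_dec {rem cap k : Int} (hk : k ∈ PySem.List.pyRange (min cap rem) 0 (-1)) :
    (rem - k).toNat < rem.toNat := by
  have h := (PySem.List.mem_pyRange_neg_one).mp hk
  omega

-- the common recursive characterisation both ports are reduced to:
-- partitions of `rem` with parts ≤ cap, blocks in descending order of the largest part
def gPart (rem cap : Int) : List (List Int) :=
  if rem = 0 then [[]]
  else
    (PySem.List.pyRange (min cap rem) 0 (-1)).attach.flatMap
      (fun k => (gPart (rem - k.1) k.1).map (fun q => k.1 :: q))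
termination_by rem.toNat
decreasing_by
  exact gPart_dec k.2

theorem gPart_unfold (rem cap : Int) :
    gPart rem cap =
      if rem = 0 then [[]]
      else
        (PySem.List.pyRange (min cap rem) 0 (-1)).flatMap
          (fun k => (gPart (rem - k) k).map (fun q => k :: q)) := by
  rw [gPart]
  split_ifs with h0 <;> simp

-- gPart depends on cap only through min cap rem
theorem gPart_cap (rem cap : Int) : gPart rem cap = gPart rem (min cap rem) := by
  rw [gPart_unfold rem cap, gPart_unfold rem (min cap rem), min_assoc, min_self]

-- ===== A's recursion equals gPart on Pre_ =====
theorem partsA_eq_gPart (fuel : Nat) (total biggest_num : Int)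
    (hf : total.toNat + biggest_num.toNat + 1 ≤ fuel)
    (hpre : 0 ≤ biggest_num ∨ total ≤ 0) :
    partsA fuel total biggest_num = gPart total biggest_num := by
  induction fuel generalizing total biggest_num with
  | zero => omega
  | succ f ih =>
    rw [gPart_unfold]
    by_cases h0 : total = 0
    · simp [partsA, h0]
    by_cases h1 : total < 0
    · simp [partsA, h0, h1, PySem.List.pyRange_neg_one_eq_nil (by omega : min biggest_num total ≤ 0)]
    have htpos : 0 < total := by omega
    have hbn : 0 ≤ biggest_num := by omega
    by_cases hb0 : biggest_num = 0
    · simp [partsA, h0, h1, hb0]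
    have hb1 : 1 ≤ biggest_num := by omega
    simp only [partsA, if_neg hb0, if_neg h0, if_neg h1]
    by_cases hbt : total < biggest_num
    · -- first branch recurses on a negative total and yields []
      rw [ih (total - biggest_num) (min biggest_num (total - biggest_num))
            (by omega) (Or.inr (by omega)),
          ih total (biggest_num - 1) (by omega) (Or.inl (by omega)),
          gPart_unfold (total - biggest_num)]
      simp only [if_neg (by omega : ¬ total - biggest_num = 0)]
      rw [PySem.List.pyRange_neg_one_eq_nil
            (by omega : min (min biggest_num (total - biggest_num)) (total - biggest_num) ≤ 0)]
      simp only [List.flatMap_nil, List.map_nil, List.nil_append]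
      rw [gPart_cap total (biggest_num - 1),
          show min (biggest_num - 1) total = min biggest_num total by omega]
      rw [← gPart_cap total biggest_num, gPart_unfold total biggest_num, if_neg h0]
    · -- biggest_num ≤ total : peel k = biggest_num off the countdown range
      have hmin : min biggest_num total = biggest_num := by omega
      rw [ih (total - biggest_num) (min biggest_num (total - biggest_num))
            (by omega) (by omega),
          ih total (biggest_num - 1) (by omega) (Or.inl (by omega))]
      rw [hmin, PySem.List.pyRange_neg_one_cons (by omega : (0:Int) < biggest_num),
          List.flatMap_cons]
      rw [← gPart_cap (total - biggest_num) biggest_num]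
      rw [gPart_unfold total (biggest_num - 1), if_neg h0,
          show min (biggest_num - 1) total = biggest_num - 1 by omega]

-- ===== B's stack loop equals gPart =====
-- flattening the blocks pushed for one popped entry gives that entry's gPart value
theorem children_flatten (pre : List Int) (rem cap : Int) (h0 : rem ≠ 0) :
    ((((PySem.List.pyRange 1 (min cap rem + 1) 1).map
          (fun k => (pre ++ [k], rem - k, k))).reverse).map
        (fun e => (gPart e.2.1 e.2.2).map (fun q => e.1 ++ q))).flatten
      = (gPart rem cap).map (fun q => pre ++ q) := by
  rw [gPart_unfold, if_neg h0, PySem.List.pyRange_neg_one_eq_reverse]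
  simp only [zero_add, List.flatMap_def, List.map_reverse, List.map_flatten, List.map_map]
  refine congrArg List.flatten (congrArg List.reverse ?_)
  apply List.map_congr_left
  intro k _
  simp [Function.comp]

theorem altLoop_eq : ∀ (fuel : Nat) (stack : List (List Int × Int × Int)) (result : List (List Int)),
    (stack.map (fun e => 2 ^ e.2.1.toNat)).sum ≤ fuel →
    altLoop fuel stack result
      = result ++ (stack.map (fun e => (gPart e.2.1 e.2.2).map (fun q => e.1 ++ q))).flatten := by
  intro fuel
  induction fuel with
  | zero =>
    intro stack result h
    match stack with
    | [] => simp [altLoop]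
    | (pre, rem, cap) :: rest =>
      exfalso
      simp at h
  | succ f ih =>
    intro stack result hn
    match stack with
    | [] => simp [altLoop]
    | (pre, rem, cap) :: rest =>
      rw [altLoop]
      have h1 : (1 : Nat) ≤ 2 ^ rem.toNat := Nat.one_le_two_pow
      by_cases h0 : rem = 0
      · subst h0
        rw [if_pos rfl, ih rest (result ++ [pre]) (by simp at hn ⊢; omega)]
        simp only [List.map_cons, List.flatten_cons]
        rw [show gPart 0 cap = [[]] from by rw [gPart_unfold]; simp]
        simp
      · rw [if_neg h0]
        have hfit :
            (((((PySem.List.pyRange 1 (min cap rem + 1) 1).map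
                  (fun k => (pre ++ [k], rem - k, k))).reverse ++ rest)).map
                (fun e => 2 ^ e.2.1.toNat)).sum ≤ f := by
          have hlt := pushSum_lt rem cap h0
          simp only [List.map_append, List.sum_append, List.map_reverse, List.sum_reverse,
            List.map_map, List.map_cons, List.sum_cons, Function.comp_def] at *
          omega
        rw [ih _ result hfit]
        rw [List.map_append, List.flatten_append, children_flatten pre rem cap h0]
        simp

theorem alt_eq_gPart (total biggest_num : Int) (h : ¬ total < 0) :
    partitions_options_alt total biggest_num = gPart total biggest_num := by
  rw [partitions_options_alt, if_neg h,
      altLoop_eq _ [([], total, biggest_num)] []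
        (by simpa using Nat.pow_le_pow_right (by norm_num) (Nat.le_succ total.toNat))]
  simp

-- ===== VERDICT (by name: the statement is the Claim_ definition above) =====
theorem partitions_options_spec : Claim_equal_partitions_options := by
  intro total biggest_num _ hpre
  unfold Spec_partitions_options partitions_options
  by_cases h : total < 0
  · have h0 : ¬ total = 0 := by omega
    simp [partsA, partitions_options_alt, h, h0]
  · rw [partsA_eq_gPart _ total biggest_num (by omega) hpre, alt_eq_gPart total biggest_num h]
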